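-- pv_equiv track=rewrite | github.com/rodixxi/python_ha_2016 | 03_practico1/practico1/ejercicios_strings.py | macheos
-- ===== SOURCE A (Python) =====
-- def macheos(args):  # No funciona
--     """
--     Implementar la función macheos que dada una lista de strings devuelve un
--     número representando la cantidad de strings que tienen más de dos
--     caracteres y cuyos últimos dos strings son iguales.
--     Nota: python no posee operador ++ pero += funciona.
--     """
--     h = args[:1]
--     t = args[1:]
--     otra = []
--     val = 0
--     for p in h:
--         if len(p) > 2:
--             for s in t:
--                 if s.endswith(p[-2:]):
--                     val += 1
--                 else:
--                     otra.append(s)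
--         val += macheos(otra)
--     return val
-- ===== SOURCE B (Python) =====
-- def macheos(args):
--     val = 0
--     cur = args
--     while cur:
--         p, t = cur[0], cur[1:]
--         if len(p) > 2:
--             suf = p[-2:]
--             val += sum(1 for s in t if s.endswith(suf))
--             cur = [s for s in t if not s.endswith(suf)]
--         else:
--             cur = []
--     return val
-- ===== Notes on version B (the rewrite author's own statement) =====
-- stated objective: alternative
-- what changed: Replaces A's recursion nested inside a for-loop (which threads val/otra through a single manual scan) by an iterative while-loop over a worklist with an accumulator, counting matches and filtering survivors in two comprehension-style passes.
import Mathlib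
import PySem

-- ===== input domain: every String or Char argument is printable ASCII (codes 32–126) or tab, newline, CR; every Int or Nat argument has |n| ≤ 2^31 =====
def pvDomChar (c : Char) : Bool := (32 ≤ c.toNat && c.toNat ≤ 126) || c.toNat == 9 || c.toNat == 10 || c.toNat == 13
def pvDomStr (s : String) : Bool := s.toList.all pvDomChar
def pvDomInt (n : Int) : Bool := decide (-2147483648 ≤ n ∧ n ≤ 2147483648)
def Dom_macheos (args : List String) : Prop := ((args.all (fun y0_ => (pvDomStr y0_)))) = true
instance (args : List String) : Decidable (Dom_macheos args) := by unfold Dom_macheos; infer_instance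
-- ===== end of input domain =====

-- B replaces A's recursion-inside-a-loop by an iterative worklist loop with an accumulator,
-- counting matches and filtering survivors in two comprehension-style passes (objective: alternative).

-- ===== PORT A =====
-- A's inner `for s in t` loop: threads the state (val, otra) over t
def pvAloop (suf : String) (acc : Int × List String) (t : List String) : Int × List String :=
  t.foldl (fun acc s =>
    if PySem.Str.endswith s suf then (acc.1 + 1, acc.2)
    else (acc.1, acc.2 ++ [s])) acc

-- length bound used only for A's termination (cited by decreasing_by)
theorem pvAloop_len (suf : String) : ∀ (t : List String) (acc : Int × List String),
    (pvAloop suf acc t).2.length ≤ acc.2.length + t.length := by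
  intro t
  induction t with
  | nil => intro acc; simp [pvAloop]
  | cons s t ih =>
    intro acc
    simp only [pvAloop, List.foldl_cons] at *
    split
    · exact le_trans (ih _) (by simp)
    · exact le_trans (ih _) (by simp; omega)

def macheos (args : List String) : Int :=
  match args with
  | [] => 0
  | p :: t =>
    -- h = args[:1] is the singleton [p]; the `for p in h` loop runs once
    if PySem.Str.len p > 2 then
      (pvAloop (PySem.Str.slice p (some (-2)) none) (0, []) t).1 +
        macheos (pvAloop (PySem.Str.slice p (some (-2)) none) (0, []) t).2
    else 0 + macheos []
termination_by args.length
decreasing_by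
  · simp only [List.length_cons]
    exact Nat.lt_succ_of_le (by simpa using pvAloop_len (PySem.Str.slice p (some (-2)) none) t (0, []))
  · simp

-- ===== PORT B =====
-- B's `while cur:` loop: val is the running total, cur the current worklist
def pvBloop (cur : List String) (val : Int) : Int :=
  match cur with
  | [] => val
  | p :: t =>
    if PySem.Str.len p > 2 then
      pvBloop (t.filter (fun s => !(PySem.Str.endswith s (PySem.Str.slice p (some (-2)) none))))
              (val + ((t.countP (fun s => PySem.Str.endswith s (PySem.Str.slice p (some (-2)) none)) : Nat) : Int))
    else val
termination_by cur.length
decreasing_by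
  simp only [List.length_cons, List.length_unattach]
  exact Nat.lt_succ_of_le (le_trans (List.length_filter_le _ _) (by simp))

def macheos_alt (args : List String) : Int := pvBloop args 0

-- ===== PRECONDITION & SPEC =====
def Spec_macheos (args : List String) (out : Int) : Prop := out = macheos_alt args
instance (args : List String) (out : Int) : Decidable (Spec_macheos args out) := by unfold Spec_macheos; infer_instance

-- ===== CLAIM (what is proved, stated in full; the proofs are below) =====
def Claim_equal_macheos : Prop := ∀ (args : List String), Dom_macheos args → Spec_macheos args (macheos args)

-- ===== LEMMAS AND PROOFS =====

-- A's fold computes exactly B's (count, filter) pair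
theorem pvAloop_eq (suf : String) : ∀ (t : List String) (acc : Int × List String),
    pvAloop suf acc t =
      (acc.1 + ((t.countP (fun s => PySem.Str.endswith s suf) : Nat) : Int),
       acc.2 ++ t.filter (fun s => !(PySem.Str.endswith s suf))) := by
  intro t
  induction t with
  | nil => intro acc; simp [pvAloop]
  | cons s t ih =>
    intro acc
    simp only [pvAloop, List.foldl_cons, List.countP_cons, List.filter_cons] at *
    by_cases h : PySem.Str.endswith s suf = true
    · rw [if_pos h, ih]
      simp only [h, Prod.mk.injEq]
      constructor
      · push_cast; ring
      · simp
    · rw [if_neg h, ih]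
      have hb : PySem.Str.endswith s suf = false := by simpa using h
      simp only [hb, Prod.mk.injEq]
      constructor
      · push_cast; ring
      · simp

-- B's loop is A's recursion plus an accumulator
theorem pvBloop_eq_macheos : ∀ (n : Nat) (cur : List String), cur.length ≤ n →
    ∀ (val : Int), pvBloop cur val = val + macheos cur := by
  intro n
  induction n with
  | zero =>
    intro cur h val
    have hc : cur = [] := List.eq_nil_of_length_eq_zero (Nat.le_zero.mp h)
    subst hc
    rw [pvBloop.eq_def, macheos.eq_def]
    simp
  | succ n ih =>
    intro cur h val
    match cur with
    | [] =>
      rw [pvBloop.eq_def, macheos.eq_def]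
      simp
    | p :: t =>
      rw [pvBloop.eq_def, macheos.eq_def]
      dsimp only
      by_cases hp : PySem.Str.len p > 2
      · rw [if_pos hp, if_pos hp, pvAloop_eq]
        have hlen : (t.filter (fun s => !(PySem.Str.endswith s (PySem.Str.slice p (some (-2)) none)))).length ≤ n := by
          have h1 := List.length_filter_le (fun s => !(PySem.Str.endswith s (PySem.Str.slice p (some (-2)) none))) t
          simp only [List.length_cons] at h
          omega
        rw [ih _ hlen]
        simp
        ring
      · rw [if_neg hp, if_neg hp]
        rw [macheos.eq_def]
        simp

-- ===== VERDICT (by name: the statement is the Claim_ definition above) =====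
theorem macheos_spec : Claim_equal_macheos := by
  intro args _
  unfold Spec_macheos macheos_alt
  rw [pvBloop_eq_macheos args.length args (le_refl _) 0]
  ring
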